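-- pv_equiv track=rewrite | github.com/cristiansante/Python-Diccionario | funcionesVACIAS.py | puntuar
-- ===== SOURCE A (Python) =====
-- def puntuar(candidata,palabra): #suma puntos si es correcta, suma distinto para vocales, consonantes faciles, consonantes dificiles y longitud.
--     puntos=0
--     if esCorrecta(candidata,palabra): #solo si es correcta va a suceder lo siguiente
--         for i in palabra: #reccore la palabra y dependiendo que letra es suma distinta cantidad de puntos
--             if (i=="a" or i=="e" or i=="i" or i=="o" or i=="u"):
--                 puntos=puntos+1
--             else:
--                 if i=="j"or i=="k" or i=="q" or i=="w" or i=="x" or i=="y" or i=="z":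
--                     puntos=puntos+5
--                 else:
--                     puntos=puntos+2
--     return(puntos)
--
-- def esCorrecta(candidata, palabra): # Devuelve verdadero si acierta falso en caso contrario
--     if candidata==palabra: #si son iguales devuelve un True
--         return(True)
--     else:
--         return(False)
-- ===== SOURCE B (Python) =====
-- def puntuar(candidata, palabra):
--     if candidata != palabra:
--         return 0
--     n_vowels = sum(1 for c in palabra if c in "aeiou")
--     n_hard = sum(1 for c in palabra if c in "jkqwxyz")
--     return 2 * len(palabra) - n_vowels + 3 * n_hard
-- ===== Notes on version B (the rewrite author's own statement) =====
-- stated objective: alternative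
-- what changed: Replaces the per-character three-way if/else accumulation with two category counts (vowels, hard consonants) combined by the closed form 2*len - n_vowels + 3*n_hard.
import Mathlib
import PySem

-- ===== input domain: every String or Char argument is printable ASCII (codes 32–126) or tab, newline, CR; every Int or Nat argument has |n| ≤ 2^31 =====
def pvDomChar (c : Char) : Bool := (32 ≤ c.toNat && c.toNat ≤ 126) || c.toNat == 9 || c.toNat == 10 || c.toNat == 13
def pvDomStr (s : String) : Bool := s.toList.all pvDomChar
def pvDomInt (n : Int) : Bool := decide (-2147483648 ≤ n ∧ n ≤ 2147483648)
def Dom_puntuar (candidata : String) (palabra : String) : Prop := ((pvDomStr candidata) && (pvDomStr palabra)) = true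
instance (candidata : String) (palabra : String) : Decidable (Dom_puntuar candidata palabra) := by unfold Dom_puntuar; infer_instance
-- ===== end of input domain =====

-- B replaces A's per-character three-way accumulation with category counts combined arithmetically (alternative decomposition, same cost).


-- ===== PORT A =====
def esCorrecta (candidata : String) (palabra : String) : Bool :=
  if candidata == palabra then true else false

def puntuarStep (puntos : Int) (i : Char) : Int :=
  if i == 'a' || i == 'e' || i == 'i' || i == 'o' || i == 'u' then
    puntos + 1
  else
    if i == 'j' || i == 'k' || i == 'q' || i == 'w' || i == 'x' || i == 'y' || i == 'z' then
      puntos + 5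
    else
      puntos + 2

def puntuar (candidata : String) (palabra : String) : Int :=
  let puntos : Int := 0
  if esCorrecta candidata palabra then
    palabra.toList.foldl puntuarStep puntos
  else
    puntos

-- ===== PORT B =====
def puntuar_alt (candidata : String) (palabra : String) : Int :=
  if candidata ≠ palabra then 0
  else
    let nVowels : Int := ((palabra.toList.filter (fun c => "aeiou".toList.contains c)).length : Int)
    let nHard : Int := ((palabra.toList.filter (fun c => "jkqwxyz".toList.contains c)).length : Int)
    2 * (palabra.toList.length : Int) - nVowels + 3 * nHard

-- ===== PRECONDITION & SPEC =====
def Spec_puntuar (candidata : String) (palabra : String) (out : Int) : Prop := out = puntuar_alt candidata palabra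
instance (candidata : String) (palabra : String) (out : Int) : Decidable (Spec_puntuar candidata palabra out) := by unfold Spec_puntuar; infer_instance

-- ===== CLAIM (what is proved, stated in full; the proofs are below) =====
def Claim_equal_puntuar : Prop := ∀ (candidata : String) (palabra : String), Dom_puntuar candidata palabra → Spec_puntuar candidata palabra (puntuar candidata palabra)

-- ===== LEMMAS AND PROOFS =====
theorem mem_aeiou (c : Char) : "aeiou".toList.contains c =
    (c == 'a' || c == 'e' || c == 'i' || c == 'o' || c == 'u') := by
  have h : "aeiou".toList = ['a', 'e', 'i', 'o', 'u'] := by decide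
  rw [h]
  simp only [List.contains_cons, List.contains_nil, Bool.or_false, Bool.or_assoc]

theorem mem_hard (c : Char) : "jkqwxyz".toList.contains c =
    (c == 'j' || c == 'k' || c == 'q' || c == 'w' || c == 'x' || c == 'y' || c == 'z') := by
  have h : "jkqwxyz".toList = ['j', 'k', 'q', 'w', 'x', 'y', 'z'] := by decide
  rw [h]
  simp only [List.contains_cons, List.contains_nil, Bool.or_false, Bool.or_assoc]

theorem aeiou_not_hard (c : Char) (h : "aeiou".toList.contains c = true) :
    "jkqwxyz".toList.contains c = false := by
  rw [mem_aeiou] at h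
  rw [mem_hard]
  simp only [Bool.or_eq_true, beq_iff_eq] at h
  rcases h with ((((rfl | rfl) | rfl) | rfl) | rfl) <;> decide

theorem puntuarStep_eq (acc : Int) (c : Char) :
    puntuarStep acc c =
      acc + (if "aeiou".toList.contains c then (1:Int)
             else if "jkqwxyz".toList.contains c then 5 else 2) := by
  rw [mem_aeiou, mem_hard]
  unfold puntuarStep
  split_ifs with h1 h2 <;> simp_all [Bool.or_assoc]

theorem puntuar_foldl_closed (l : List Char) (acc : Int) :
    l.foldl puntuarStep acc =
      acc + 2 * (l.length : Int)
        - ((l.filter (fun c => "aeiou".toList.contains c)).length : Int)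
        + 3 * ((l.filter (fun c => "jkqwxyz".toList.contains c)).length : Int) := by
  induction l generalizing acc with
  | nil => simp
  | cons c t ih =>
    rw [List.foldl_cons, ih, puntuarStep_eq]
    simp only [List.length_cons, List.filter_cons]
    by_cases h1 : "aeiou".toList.contains c = true
    · have hh := aeiou_not_hard c h1
      simp only [h1, hh, Bool.false_eq_true, if_true, if_false,
        List.length_cons]
      push_cast; ring
    · have h1' : "aeiou".toList.contains c = false := by
        simpa using h1
      by_cases h2 : "jkqwxyz".toList.contains c = true
      · simp only [h1', h2, Bool.false_eq_true, if_true, if_false,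
          List.length_cons]
        push_cast; ring
      · have h2' : "jkqwxyz".toList.contains c = false := by
          simpa using h2
        simp only [h1', h2', Bool.false_eq_true, if_false]
        push_cast; ring

-- ===== VERDICT (by name: the statement is the Claim_ definition above) =====
theorem puntuar_spec : Claim_equal_puntuar := by
  intro candidata palabra _
  unfold Spec_puntuar puntuar puntuar_alt esCorrecta
  by_cases h : candidata = palabra
  · subst h
    simp only [beq_self_eq_true, if_true, ne_eq, not_true_eq_false,
      if_false]
    rw [puntuar_foldl_closed]
    ring
  · have hb : (candidata == palabra) = false := by simpa using h
    simp only [hb, Bool.false_eq_true, if_false, ne_eq, h, not_false_iff, if_true]
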